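-- pv_equiv track=rewrite | github.com/Vikkrantpol/US_India_Signal_Lab | scan_state.py | _signal_reason_bucket
-- ===== SOURCE A (Python) =====
-- def _signal_reason_bucket(signal):
--     text = str(signal or "").strip()
--     if not text:
--         return None
--     for prefix in (
--         "Near 52W High",
--         "Above EMA21",
--         "Above EMA50",
--         "Above EMA200",
--         "Volume Spike",
--         "Upper Circuit",
--         "Delivery",
--         "EPS Growth",
--         "Rev Growth",
--     ):
--         if text.startswith(prefix):
--             return prefix
--     return text
-- ===== SOURCE B (Python) =====
-- _PREFIXES = (
--     "Near 52W High",
--     "Above EMA21",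
--     "Above EMA50",
--     "Above EMA200",
--     "Volume Spike",
--     "Upper Circuit",
--     "Delivery",
--     "EPS Growth",
--     "Rev Growth",
-- )
--
--
-- def _build_automaton():
--     # Build a prefix-trie automaton once: flat transition table keyed by
--     # (state, char) and an accept map state -> prefix.  No prefix is a prefix
--     # of another, so the first accepting state reached is the unique match
--     # and the tuple order of _PREFIXES is irrelevant.
--     trans = {}
--     accept = {}
--     n = 1
--     for p in _PREFIXES:
--         s = 0
--         for ch in p:
--             nxt = trans.get((s, ch))
--             if nxt is None:
--                 nxt = n
--                 trans[(s, ch)] = n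
--                 n += 1
--             s = nxt
--         accept[s] = p
--     return trans, accept
--
--
-- _TRANS, _ACCEPT = _build_automaton()
--
--
-- def _signal_reason_bucket(sig):
--     text = str(sig or "").strip()
--     if not text:
--         return None
--     s = 0
--     for ch in text:
--         s = _TRANS.get((s, ch))
--         if s is None:
--             return text
--         hit = _ACCEPT.get(s)
--         if hit is not None:
--             return hit
--     return text
-- ===== Notes on version B (the rewrite author's own statement) =====
-- stated objective: alternative
-- what changed: A runs nine startswith tests per call; B precompiles the prefixes into a prefix-trie automaton (flat (state,char) transition table plus accept map, built once) and classifies by walking the text character by character until an accepting state or a missing transition; correct regardless of tuple order because no listed prefix is a prefix of another.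
import Mathlib
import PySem

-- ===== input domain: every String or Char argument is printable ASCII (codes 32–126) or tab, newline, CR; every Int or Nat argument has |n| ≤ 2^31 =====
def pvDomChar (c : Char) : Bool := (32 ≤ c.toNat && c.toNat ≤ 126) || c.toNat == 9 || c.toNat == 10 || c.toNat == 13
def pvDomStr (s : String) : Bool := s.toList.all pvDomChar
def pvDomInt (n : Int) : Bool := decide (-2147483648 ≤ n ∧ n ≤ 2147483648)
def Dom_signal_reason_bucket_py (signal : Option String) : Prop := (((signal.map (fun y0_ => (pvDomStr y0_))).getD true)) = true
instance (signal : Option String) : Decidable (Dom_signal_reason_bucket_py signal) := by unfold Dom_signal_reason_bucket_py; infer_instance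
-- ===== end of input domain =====

-- B replaces A's per-call linear scan of nine startswith tests by a prefix-trie
-- automaton built once (flat (state,char) transition table + accept map), walked
-- character by character over the text: objective 'alternative'.

-- ===== PORT A =====
def pvPrefixesA : List String :=
  ["Near 52W High", "Above EMA21", "Above EMA50", "Above EMA200",
   "Volume Spike", "Upper Circuit", "Delivery", "EPS Growth", "Rev Growth"]

-- the for-loop with early return over the prefix tuple
def pvScanA (text : String) : List String → Option String
  | [] => none
  | p :: ps => if PySem.Str.startswith text p then some p else pvScanA text ps

def signal_reason_bucket_py (signal : Option String) : Option String :=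
  let text := PySem.Str.strip (signal.getD "")   -- str(signal or "").strip(): None and "" both give ""
  if text = "" then none
  else
    match pvScanA text pvPrefixesA with
    | some p => some p
    | none => some text

-- ===== PORT B =====
def pvPrefixesB : List String :=
  ["Near 52W High", "Above EMA21", "Above EMA50", "Above EMA200",
   "Volume Spike", "Upper Circuit", "Delivery", "EPS Growth", "Rev Growth"]

-- _build_automaton's inner loop over the characters of one prefix:
-- state = (trans, n, s)
def pvAddPrefix (tr : PySem.Dict (Nat × Char) Nat) (n : Nat) (p : String) :
    PySem.Dict (Nat × Char) Nat × Nat × Nat :=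
  p.toList.foldl
    (fun (acc : PySem.Dict (Nat × Char) Nat × Nat × Nat) ch =>
      let (tr, n, s) := acc
      match tr.get? (s, ch) with
      | none => (tr.insert (s, ch) n, n + 1, n)
      | some nxt => (tr, n, nxt))
    (tr, n, 0)

-- _build_automaton's outer loop over the prefixes: state = (trans, accept, n)
def pvAutomaton : PySem.Dict (Nat × Char) Nat × PySem.Dict Nat String × Nat :=
  pvPrefixesB.foldl
    (fun acc p =>
      let (tr, accept, n) := acc
      let (tr', n', s) := pvAddPrefix tr n p
      (tr', accept.insert s p, n'))
    (PySem.Dict.empty, PySem.Dict.empty, 1)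

def pvTrans : PySem.Dict (Nat × Char) Nat := pvAutomaton.1
def pvAccept : PySem.Dict Nat String := pvAutomaton.2.1

-- the character loop of _signal_reason_bucket with its early returns;
-- none = 'return text' fallthrough (no transition / text exhausted)
def pvWalk : List Char → Nat → Option String
  | [], _ => none
  | c :: cs, s =>
    match pvTrans.get? (s, c) with
    | none => none
    | some s' =>
      match pvAccept.get? s' with
      | some hit => some hit
      | none => pvWalk cs s'

def signal_reason_bucket_py_alt (signal : Option String) : Option String :=
  let text := PySem.Str.strip (signal.getD "")
  if text = "" then none
  else some ((pvWalk text.toList 0).getD text)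

-- ===== PRECONDITION & SPEC =====
def Spec_signal_reason_bucket_py (signal : Option String) (out : Option String) : Prop := out = signal_reason_bucket_py_alt signal
instance (signal : Option String) (out : Option String) : Decidable (Spec_signal_reason_bucket_py signal out) := by unfold Spec_signal_reason_bucket_py; infer_instance

-- ===== CLAIM (what is proved, stated in full; the proofs are below) =====
def Claim_equal_signal_reason_bucket_py : Prop := ∀ (signal : Option String), Dom_signal_reason_bucket_py signal → Spec_signal_reason_bucket_py signal (signal_reason_bucket_py signal)

-- ===== LEMMAS AND PROOFS =====

-- the path spelled to reach each state of the concrete automaton (proof-side table)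
def pvWalkP : List Char → Nat → Option Nat
  | [], s => some s
  | c :: cs, s =>
    match pvTrans.get? (s, c) with
    | none => none
    | some s' => pvWalkP cs s'

def pvSpellTable : List (Nat × List Char) :=
  pvPrefixesB.flatMap (fun p =>
    (List.range (p.toList.length + 1)).map
      (fun i => ((pvWalkP (p.toList.take i) 0).getD 0, p.toList.take i)))

def pvSpell (s : Nat) : List Char :=
  ((pvSpellTable.find? (fun e => e.1 == s)).map (·.2)).getD []

-- a some-result of the walk is stable under extending the input
theorem pvWalk_append {l : List Char} {s : Nat} {p : String}
    (h : pvWalk l s = some p) (rest : List Char) : pvWalk (l ++ rest) s = some p := by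
  induction l generalizing s with
  | nil => simp [pvWalk] at h
  | cons c cs ih =>
    rw [List.cons_append]
    cases ht : pvTrans.get? (s, c) with
    | none => simp only [pvWalk, ht] at h; cases h
    | some s' =>
      cases ha : pvAccept.get? s' with
      | some hit => simp only [pvWalk, ht, ha] at h ⊢; exact h
      | none => simp only [pvWalk, ht, ha] at h ⊢; exact ih h

-- every transition extends the spelled path by its character (checked on the concrete table)
theorem pv_spell_step : pvTrans.items.all
    (fun e => pvSpell e.2 == pvSpell e.1.1 ++ [e.1.2]) = true := by decide

-- accepting states spell exactly their prefix, and accepted values are listed prefixes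
theorem pv_spell_accept : pvAccept.items.all
    (fun e => pvSpell e.1 == e.2.toList && decide (e.2 ∈ pvPrefixesA)) = true := by decide

theorem pv_spell_zero : pvSpell 0 = [] := by decide

-- any some-result of the walk is a prefix the walk consumed: p.toList = spell s ++ l1, l1 <+: l
theorem pvWalk_some {l : List Char} {s : Nat} {p : String}
    (h : pvWalk l s = some p) :
    ∃ l1, l1 <+: l ∧ p.toList = pvSpell s ++ l1 ∧ p ∈ pvPrefixesA := by
  induction l generalizing s with
  | nil => simp [pvWalk] at h
  | cons c cs ih =>
    cases ht : pvTrans.get? (s, c) with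
    | none => simp only [pvWalk, ht] at h; cases h
    | some s' =>
      have hmem := PySem.Dict.mem_items_of_get?_eq_some _ ht
      have hstep := (List.all_eq_true.mp pv_spell_step) _ hmem
      have hspell : pvSpell s' = pvSpell s ++ [c] := by
        simpa using hstep
      cases ha : pvAccept.get? s' with
      | some hit =>
        simp only [pvWalk, ht, ha] at h
        cases h
        have hamem := PySem.Dict.mem_items_of_get?_eq_some _ ha
        have hacc := (List.all_eq_true.mp pv_spell_accept) _ hamem
        simp only [Bool.and_eq_true, beq_iff_eq, decide_eq_true_eq] at hacc
        refine ⟨[c], ⟨cs, rfl⟩, ?_, hacc.2⟩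
        rw [← hacc.1, hspell]
      | none =>
        simp only [pvWalk, ht, ha] at h
        obtain ⟨l1, hpre, hsp, hin⟩ := ih h
        exact ⟨c :: l1, (List.prefix_cons_inj c).mpr hpre, by rw [hsp, hspell]; simp, hin⟩

-- if some listed prefix matches the text, A's scan does not fall through
theorem pvScanA_ne_none {text p : String} {ps : List String}
    (hmem : p ∈ ps) (hsw : PySem.Str.startswith text p = true) :
    pvScanA text ps ≠ none := by
  induction ps with
  | nil => simp at hmem
  | cons q qs ih =>
    rw [pvScanA]
    rcases List.mem_cons.mp hmem with h | h
    · subst h; rw [hsw]; simp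
    · split
      · simp
      · exact ih h

-- a some-result of A's scan is a listed prefix matching the text
theorem pvScanA_some {text p : String} {ps : List String}
    (h : pvScanA text ps = some p) :
    PySem.Str.startswith text p = true ∧ p ∈ ps := by
  induction ps with
  | nil => simp [pvScanA] at h
  | cons q qs ih =>
    rw [pvScanA] at h
    split at h
    · cases h
      exact ⟨by assumption, List.mem_cons_self⟩
    · exact ⟨(ih h).1, List.mem_cons_of_mem _ (ih h).2⟩

-- the walk accepts each listed prefix (closed computation on the automaton)
theorem pvWalk_prefixes : pvPrefixesA.all
    (fun p => pvWalk p.toList 0 == some p) = true := by decide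

-- scan and walk agree on every text
theorem pv_scan_eq_walk (text : String) :
    pvScanA text pvPrefixesA = pvWalk text.toList 0 := by
  cases hs : pvScanA text pvPrefixesA with
  | some p =>
    obtain ⟨hsw, hmem⟩ := pvScanA_some hs
    have hwp : pvWalk p.toList 0 = some p := by
      have := (List.all_eq_true.mp pvWalk_prefixes) _ hmem
      simpa using this
    obtain ⟨rest, hrest⟩ := (PySem.Chars.startswith_iff _ _).mp (by
      rw [PySem.Str.startswith_eq] at hsw; exact hsw)
    rw [← hrest, pvWalk_append hwp rest]
  | none =>
    cases hw : pvWalk text.toList 0 with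
    | none => rfl
    | some p =>
      exfalso
      obtain ⟨l1, hpre, hsp, hin⟩ := pvWalk_some hw
      rw [pv_spell_zero, List.nil_append] at hsp
      have hsw : PySem.Str.startswith text p = true := by
        rw [PySem.Str.startswith_eq]
        exact (PySem.Chars.startswith_iff _ _).mpr (hsp ▸ hpre)
      exact pvScanA_ne_none hin hsw hs

-- ===== VERDICT (by name: the statement is the Claim_ definition above) =====
theorem signal_reason_bucket_py_spec : Claim_equal_signal_reason_bucket_py := by
  intro signal _
  unfold Spec_signal_reason_bucket_py signal_reason_bucket_py signal_reason_bucket_py_alt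
  set text := PySem.Str.strip (signal.getD "") with htext
  by_cases h : text = ""
  · simp [h]
  · simp only [h, if_false]
    rw [← pv_scan_eq_walk text]
    cases pvScanA text pvPrefixesA <;> simp
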